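-- pv_equiv track=rewrite | github.com/cdccnleo/RQA2025 | scripts/data_layer_ai_driven_management.py | _combine_adjustments
-- ===== SOURCE A (Python) =====
-- from typing import Dict, List, Any, Optional, Tuple
--
-- def _combine_adjustments(demand_adjustments: List[Dict], resource_adjustments: List[Dict]) -> List[Dict]:
--     """合并调整建议"""
--     combined = demand_adjustments + resource_adjustments
--
--     # 按优先级排序
--     priority_order = {'high': 3, 'medium': 2, 'low': 1}
--     combined.sort(key=lambda x: priority_order.get(x.get('priority', 'low'), 1), reverse=True)
--
--     # 去重（基于action）
--     seen_actions = set()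
--     unique_adjustments = []
--
--     for adjustment in combined:
--         action_key = f"{adjustment.get('component', '')}_{adjustment.get('action', '')}"
--         if action_key not in seen_actions:
--             seen_actions.add(action_key)
--             unique_adjustments.append(adjustment)
--
--     return unique_adjustments
-- ===== SOURCE B (Python) =====
-- from typing import Dict, List
--
-- def _combine_adjustments(demand_adjustments: List[Dict], resource_adjustments: List[Dict]) -> List[Dict]:
--     """Bucket by the three possible priorities (no comparison sort), then dedup via an insertion-ordered dict."""
--     priority_order = {'high': 3, 'medium': 2, 'low': 1}
--     buckets = {3: [], 2: [], 1: []}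
--     for adjustment in demand_adjustments + resource_adjustments:
--         buckets[priority_order.get(adjustment.get('priority', 'low'), 1)].append(adjustment)
--
--     result = {}
--     for adjustment in buckets[3] + buckets[2] + buckets[1]:
--         action_key = f"{adjustment.get('component', '')}_{adjustment.get('action', '')}"
--         result.setdefault(action_key, adjustment)
--     return list(result.values())
-- ===== Notes on version B (the rewrite author's own statement) =====
-- stated objective: alternative
-- what changed: Replaces the stable comparison sort + seen-set dedup with a single bucketing pass into three priority buckets (the key only takes values 3/2/1) concatenated high-to-low, deduplicated via dict.setdefault in insertion order.
import Mathlib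
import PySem

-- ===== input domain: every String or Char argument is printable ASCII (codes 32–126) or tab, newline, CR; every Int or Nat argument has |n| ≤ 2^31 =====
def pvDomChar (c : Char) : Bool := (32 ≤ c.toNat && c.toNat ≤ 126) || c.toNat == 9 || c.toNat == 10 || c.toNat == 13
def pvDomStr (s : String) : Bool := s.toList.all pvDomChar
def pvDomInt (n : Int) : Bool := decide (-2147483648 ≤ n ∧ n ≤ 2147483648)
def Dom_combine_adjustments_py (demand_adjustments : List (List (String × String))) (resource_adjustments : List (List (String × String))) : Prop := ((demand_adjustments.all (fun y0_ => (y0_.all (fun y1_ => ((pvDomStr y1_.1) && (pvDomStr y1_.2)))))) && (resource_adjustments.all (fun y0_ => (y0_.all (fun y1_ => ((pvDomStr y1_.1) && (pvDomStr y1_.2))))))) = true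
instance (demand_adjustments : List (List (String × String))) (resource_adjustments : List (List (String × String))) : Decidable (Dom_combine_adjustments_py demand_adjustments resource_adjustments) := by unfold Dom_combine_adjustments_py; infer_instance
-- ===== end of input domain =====

-- B replaces A's stable comparison sort by three priority buckets filled in one pass (the priority key only
-- takes the values 3/2/1) and the seen-set dedup by dict.setdefault; objective: alternative.

-- ===== PORT A =====
-- x.get(k, dflt) on an adjustment dict (association list: first match, Python dict.get)
def pvAdjGet (adj : List (String × String)) (k dflt : String) : String :=
  PySem.Dict.getD (PySem.Dict.mk adj) k dflt

-- priority_order.get(x.get('priority', 'low'), 1)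
def pvPrioKey (adj : List (String × String)) : Int :=
  PySem.Dict.getD (PySem.Dict.mk [("high", (3 : Int)), ("medium", 2), ("low", 1)])
    (pvAdjGet adj "priority" "low") 1

-- f"{adjustment.get('component', '')}_{adjustment.get('action', '')}"
def pvActionKey (adj : List (String × String)) : String :=
  pvAdjGet adj "component" "" ++ "_" ++ pvAdjGet adj "action" ""

def combine_adjustments_py (demand_adjustments : List (List (String × String))) (resource_adjustments : List (List (String × String))) : List (List (String × String)) :=
  let combined := demand_adjustments ++ resource_adjustments
  let sortedCombined := PySem.List.sorted combined pvPrioKey true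
  (sortedCombined.foldl
    (fun (st : PySem.Set String × List (List (String × String))) adjustment =>
      let action_key := pvActionKey adjustment
      if action_key ∈ st.1 then st
      else (PySem.Set.add st.1 action_key, st.2 ++ [adjustment]))
    (PySem.Set.empty, [])).2

-- ===== PORT B =====
def combine_adjustments_py_alt (demand_adjustments : List (List (String × String))) (resource_adjustments : List (List (String × String))) : List (List (String × String)) :=
  -- buckets = {3: [], 2: [], 1: []}: one pass appending each adjustment to its priority's bucket
  let buckets := (demand_adjustments ++ resource_adjustments).foldl
    (fun (b : List (List (String × String)) × List (List (String × String)) × List (List (String × String))) adjustment =>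
      let p := pvPrioKey adjustment
      if p == 3 then (b.1 ++ [adjustment], b.2.1, b.2.2)
      else if p == 2 then (b.1, b.2.1 ++ [adjustment], b.2.2)
      else (b.1, b.2.1, b.2.2 ++ [adjustment]))
    ([], [], [])
  -- result = {}; result.setdefault(action_key, adjustment) over buckets[3] + buckets[2] + buckets[1]
  let result := (buckets.1 ++ buckets.2.1 ++ buckets.2.2).foldl
    (fun (d : PySem.Dict String (List (String × String))) adjustment =>
      d.setdefault (pvActionKey adjustment) adjustment)
    PySem.Dict.empty
  result.values

-- ===== PRECONDITION & SPEC =====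
def Spec_combine_adjustments_py (demand_adjustments : List (List (String × String))) (resource_adjustments : List (List (String × String))) (out : List (List (String × String))) : Prop := out = combine_adjustments_py_alt demand_adjustments resource_adjustments
instance (demand_adjustments : List (List (String × String))) (resource_adjustments : List (List (String × String))) (out : List (List (String × String))) : Decidable (Spec_combine_adjustments_py demand_adjustments resource_adjustments out) := by unfold Spec_combine_adjustments_py; infer_instance

-- ===== CLAIM (what is proved, stated in full; the proofs are below) =====
def Claim_equal_combine_adjustments_py : Prop := ∀ (demand_adjustments : List (List (String × String))) (resource_adjustments : List (List (String × String))), Dom_combine_adjustments_py demand_adjustments resource_adjustments → Spec_combine_adjustments_py demand_adjustments resource_adjustments (combine_adjustments_py demand_adjustments resource_adjustments)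

-- ===== LEMMAS AND PROOFS =====

-- the priority key takes only the values 3, 2 and 1
lemma pvPrioKey_cases (adj : List (String × String)) :
    pvPrioKey adj = 3 ∨ pvPrioKey adj = 2 ∨ pvPrioKey adj = 1 := by
  unfold pvPrioKey
  rw [PySem.Dict.getD_eq_get?_getD]
  simp only [PySem.Dict.get?_mk_cons]
  split_ifs <;> simp [PySem.Dict.get?]

lemma insertBy_append_of_forall_not_before {α : Type} (before : α → α → Bool) (x : α)
    (as bs : List α) (h : ∀ y ∈ as, before x y = false) :
    PySem.List.insertBy before x (as ++ bs) = as ++ PySem.List.insertBy before x bs := by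
  induction as with
  | nil => rfl
  | cons a as ih =>
    have ha : before x a = false := h a (by simp)
    simp only [List.cons_append, PySem.List.insertBy, ha]
    simp [ih (fun y hy => h y (by simp [hy]))]

lemma insertBy_head_before {α : Type} (before : α → α → Bool) (x : α)
    (bs : List α) (h : ∀ y ∈ bs, before x y = true) :
    PySem.List.insertBy before x bs = x :: bs := by
  cases bs with
  | nil => rfl
  | cons b bs => simp [PySem.List.insertBy, h b (by simp)]

lemma sorted_rev_eq_buckets (l : List (List (String × String))) :
    PySem.List.sorted l pvPrioKey true =
      l.filter (fun a => pvPrioKey a == 3) ++ l.filter (fun a => pvPrioKey a == 2)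
        ++ l.filter (fun a => pvPrioKey a == 1) := by
  induction l using List.reverseRecOn with
  | nil => rfl
  | append_singleton l x ih =>
    rw [PySem.List.sorted_rev_eq_foldl_insertBy] at ih ⊢
    rw [List.foldl_append, List.foldl_cons, List.foldl_nil, ih]
    have key_of_mem : ∀ (c : Int) (y : List (String × String)),
        y ∈ l.filter (fun a => pvPrioKey a == c) → pvPrioKey y = c := by
      intro c y hy
      simpa using (List.mem_filter.mp hy).2
    rcases pvPrioKey_cases x with hx | hx | hx
    · -- x has priority 3: it lands right after the 3-bucket
      rw [List.append_assoc,
          insertBy_append_of_forall_not_before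
            (as := l.filter (fun a => pvPrioKey a == 3)) _ _ _ (by
            intro y hy
            have := key_of_mem 3 y hy
            simp [this, hx]),
          insertBy_head_before _ _ _ (by
            intro y hy
            rcases List.mem_append.mp hy with hy | hy
            · have := key_of_mem 2 y hy; simp [this, hx]
            · have := key_of_mem 1 y hy; simp [this, hx])]
      simp [List.filter_append, hx, List.append_assoc]
    · -- x has priority 2: it lands right after the 2-bucket
      rw [insertBy_append_of_forall_not_before
            (as := l.filter (fun a => pvPrioKey a == 3) ++ l.filter (fun a => pvPrioKey a == 2))
            _ _ _ (by
            intro y hy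
            rcases List.mem_append.mp hy with hy | hy
            · have := key_of_mem 3 y hy; simp [this, hx]
            · have := key_of_mem 2 y hy; simp [this, hx]),
          insertBy_head_before _ _ _ (by
            intro y hy
            have := key_of_mem 1 y hy; simp [this, hx])]
      simp [List.filter_append, hx, List.append_assoc]
    · -- x has priority 1: it lands at the very end
      rw [PySem.List.insertBy_of_forall_not_before _ _ _ (by
            intro y hy
            rcases List.mem_append.mp hy with hy | hy
            · rcases List.mem_append.mp hy with hy | hy
              · have := key_of_mem 3 y hy; simp [this, hx]
              · have := key_of_mem 2 y hy; simp [this, hx]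
            · have := key_of_mem 1 y hy; simp [this, hx])]
      simp [List.filter_append, hx, List.append_assoc]

lemma buckets_eq_filters (l : List (List (String × String)))
    (a3 a2 a1 : List (List (String × String))) :
    l.foldl
      (fun (b : List (List (String × String)) × List (List (String × String)) × List (List (String × String))) adjustment =>
        let p := pvPrioKey adjustment
        if p == 3 then (b.1 ++ [adjustment], b.2.1, b.2.2)
        else if p == 2 then (b.1, b.2.1 ++ [adjustment], b.2.2)
        else (b.1, b.2.1, b.2.2 ++ [adjustment]))
      (a3, a2, a1) =
    (a3 ++ l.filter (fun a => pvPrioKey a == 3),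
     a2 ++ l.filter (fun a => pvPrioKey a == 2),
     a1 ++ l.filter (fun a => pvPrioKey a == 1)) := by
  induction l generalizing a3 a2 a1 with
  | nil => simp
  | cons x l ih =>
    rcases pvPrioKey_cases x with hx | hx | hx <;>
      · simp only [List.foldl_cons, hx, Int.reduceBEq, reduceIte]
        rw [ih]
        simp [hx]

lemma dedup_eq (l : List (List (String × String))) (out : List (List (String × String))) :
    (l.foldl
      (fun (st : PySem.Set String × List (List (String × String))) adjustment =>
        let action_key := pvActionKey adjustment
        if action_key ∈ st.1 then st
        else (PySem.Set.add st.1 action_key, st.2 ++ [adjustment]))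
      (out.map pvActionKey, out)).2 =
    (l.foldl
      (fun (d : PySem.Dict String (List (String × String))) adjustment =>
        d.setdefault (pvActionKey adjustment) adjustment)
      (PySem.Dict.mk (out.map (fun a => (pvActionKey a, a))))).values := by
  induction l generalizing out with
  | nil =>
    simp [PySem.Dict.values, Function.comp_def]
  | cons x l ih =>
    simp only [List.foldl_cons]
    by_cases h : pvActionKey x ∈ out.map pvActionKey
    · have hc : (PySem.Dict.mk (out.map (fun a => (pvActionKey a, a)))).contains (pvActionKey x) = true := by
        simp [PySem.Dict.contains_eq_decide_mem_keys, PySem.Dict.keys, List.map_map]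
        simpa [Function.comp] using h
      rw [PySem.Dict.setdefault_of_contains _ _ hc]
      simp only [h, if_true]
      exact ih out
    · have hc : (PySem.Dict.mk (out.map (fun a => (pvActionKey a, a)))).contains (pvActionKey x) = false := by
        simp [PySem.Dict.contains_eq_decide_mem_keys, PySem.Dict.keys, List.map_map]
        simpa [Function.comp] using h
      rw [PySem.Dict.setdefault_of_not_contains _ _ hc]
      have hitems := PySem.Dict.items_insert_of_not_contains
        (PySem.Dict.mk (out.map (fun a => (pvActionKey a, a)))) x hc
      have hd : (PySem.Dict.mk (out.map (fun a => (pvActionKey a, a)))).insert (pvActionKey x) x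
          = PySem.Dict.mk ((out ++ [x]).map (fun a => (pvActionKey a, a))) := by
        apply PySem.Dict.ext
        simp [hitems]
      have hset : PySem.Set.add (out.map pvActionKey) (pvActionKey x)
          = (out ++ [x]).map pvActionKey := by
        simp [PySem.Set.add, PySem.Set.contains, h]
      simp only [h, if_false]
      rw [hd]
      simpa [hset] using ih (out ++ [x])
-- ===== VERDICT (by name: the statement is the Claim_ definition above) =====
theorem combine_adjustments_py_spec : Claim_equal_combine_adjustments_py := by
  intro d r _
  unfold Spec_combine_adjustments_py combine_adjustments_py combine_adjustments_py_alt
  simp only [sorted_rev_eq_buckets, buckets_eq_filters]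
  simpa using
    dedup_eq (((d ++ r).filter (fun a => pvPrioKey a == 3))
        ++ ((d ++ r).filter (fun a => pvPrioKey a == 2))
        ++ ((d ++ r).filter (fun a => pvPrioKey a == 1))) []
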